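-- pv_equiv track=rewrite | github.com/polala234/Revit-door-auto-numbering- | script.py | get_alphabet_sequence
-- ===== SOURCE A (Python) =====
-- import string
--
-- def get_alphabet_sequence(count):
--     letters = []
--     for i in range(1, count + 1):
--         s = ''
--         n = i
--         while n > 0:
--             n, remainder = divmod(n - 1, 26)
--             s = string.ascii_uppercase[remainder] + s
--         letters.append(s)
--     return letters
-- ===== SOURCE B (Python) =====
-- import string
--
-- def get_alphabet_sequence(count):
--     letters = []
--     digits = []  # 0-based letter indices, least-significant first
--     for _ in range(count):
--         # increment the odometer with carry propagation
--         i = 0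
--         while i < len(digits) and digits[i] == 25:
--             digits[i] = 0
--             i += 1
--         if i == len(digits):
--             digits.append(0)
--         else:
--             digits[i] += 1
--         letters.append(''.join(string.ascii_uppercase[d] for d in reversed(digits)))
--     return letters
-- ===== Notes on version B (the rewrite author's own statement) =====
-- stated objective: alternative
-- what changed: Replaces per-index bijective base-26 conversion (an inner divmod loop recomputing each label from its ordinal) with a single running odometer of 0-based digits incremented with carry propagation once per output element.
import Mathlib
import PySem

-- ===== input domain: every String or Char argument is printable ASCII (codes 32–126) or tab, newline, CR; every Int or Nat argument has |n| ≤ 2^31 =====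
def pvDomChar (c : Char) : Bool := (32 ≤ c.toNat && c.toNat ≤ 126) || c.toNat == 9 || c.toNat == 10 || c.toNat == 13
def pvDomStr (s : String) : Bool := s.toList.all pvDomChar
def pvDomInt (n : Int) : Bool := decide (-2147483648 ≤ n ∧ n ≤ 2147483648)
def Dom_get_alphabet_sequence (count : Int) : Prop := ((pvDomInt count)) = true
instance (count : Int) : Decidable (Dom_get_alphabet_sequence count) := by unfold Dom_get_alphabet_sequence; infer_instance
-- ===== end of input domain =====

-- B replaces A's per-index divmod base-26 conversion with a running odometer incremented once per element (alternative decomposition, similar cost).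

-- shared helper: string.ascii_uppercase[r] as a one-char List Char (r is always in [0,26) in both ports, so the none branch is unreachable)
def pvLetterAt (r : Int) : List Char :=
  (PySem.List.pyGet? "ABCDEFGHIJKLMNOPQRSTUVWXYZ".toList r).elim [] (fun c => [c])

-- ===== PORT A =====
-- the while loop of A: s accumulated as List Char (exact: all chars are single ASCII letters)
def pvALoop (n : Int) (s : List Char) : List Char :=
  if 0 < n then
    pvALoop (PySem.Int.floordiv (n - 1) 26) (pvLetterAt (PySem.Int.mod (n - 1) 26) ++ s)
  else s
termination_by n.toNat
decreasing_by
  rw [PySem.Int.floordiv_eq_ediv_of_pos (by norm_num)]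
  omega

def get_alphabet_sequence (count : Int) : List String :=
  (PySem.List.pyRange 1 (count + 1) 1).foldl
    (fun acc i => acc ++ [String.ofList (pvALoop i [])]) []

-- ===== PORT B =====
-- B's inner while loop: propagate the carry over the 0-based digits (least-significant first)
def pvInc : List Int → List Int
  | [] => [0]
  | d :: ds => if d = 25 then 0 :: pvInc ds else (d + 1) :: ds

-- ''.join(ascii_uppercase[d] for d in reversed(digits))
def pvRender (ds : List Int) : String :=
  String.ofList ((ds.reverse.map pvLetterAt).flatten)

def pvBLoop : Nat → List Int → List String
  | 0, _ => []
  | k + 1, ds =>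
    let ds' := pvInc ds
    pvRender ds' :: pvBLoop k ds'

def get_alphabet_sequence_alt (count : Int) : List String :=
  pvBLoop count.toNat []

-- ===== PRECONDITION & SPEC =====
def Spec_get_alphabet_sequence (count : Int) (out : List String) : Prop := out = get_alphabet_sequence_alt count
instance (count : Int) (out : List String) : Decidable (Spec_get_alphabet_sequence count out) := by unfold Spec_get_alphabet_sequence; infer_instance

-- ===== CLAIM (what is proved, stated in full; the proofs are below) =====
def Claim_equal_get_alphabet_sequence : Prop := ∀ (count : Int), Dom_get_alphabet_sequence count → Spec_get_alphabet_sequence count (get_alphabet_sequence count)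

-- ===== LEMMAS AND PROOFS =====

-- the bijective base-26 value represented by an odometer state
def pvVal : List Int → Int
  | [] => 0
  | d :: ds => d + 1 + 26 * pvVal ds

def pvValid (ds : List Int) : Prop := ∀ d ∈ ds, 0 ≤ d ∧ d ≤ 25

theorem pvVal_nonneg (ds : List Int) (h : pvValid ds) : 0 ≤ pvVal ds := by
  induction ds with
  | nil => simp [pvVal]
  | cons d ds ih =>
    have hd := h d (by simp)
    have := ih (fun x hx => h x (by simp [hx]))
    simp only [pvVal]; omega

theorem pvValid_inc (ds : List Int) (h : pvValid ds) : pvValid (pvInc ds) := by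
  induction ds with
  | nil => intro d hd; simp [pvInc] at hd; omega
  | cons d ds ih =>
    have hd := h d (by simp)
    by_cases h25 : d = 25
    · intro x hx
      simp [pvInc, h25] at hx
      rcases hx with hx | hx
      · omega
      · exact ih (fun y hy => h y (by simp [hy])) x hx
    · intro x hx
      simp [pvInc, h25] at hx
      rcases hx with hx | hx
      · omega
      · exact h x (by simp [hx])

theorem pvVal_inc (ds : List Int) : pvVal (pvInc ds) = pvVal ds + 1 := by
  induction ds with
  | nil => simp [pvInc, pvVal]
  | cons d ds ih =>
    by_cases h25 : d = 25
    · subst h25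
      have : pvInc (25 :: ds) = 0 :: pvInc ds := by simp [pvInc]
      rw [this]; simp only [pvVal, ih]; ring
    · simp only [pvInc, if_neg h25, pvVal]; ring

theorem pvALoop_acc (n : Int) (s : List Char) : pvALoop n s = pvALoop n [] ++ s := by
  by_cases h : 0 < n
  · conv_lhs => rw [pvALoop]
    conv_rhs => rw [pvALoop]
    simp only [if_pos h]
    rw [pvALoop_acc (PySem.Int.floordiv (n - 1) 26) (pvLetterAt (PySem.Int.mod (n - 1) 26) ++ s),
      pvALoop_acc (PySem.Int.floordiv (n - 1) 26) (pvLetterAt (PySem.Int.mod (n - 1) 26) ++ [])]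
    simp
  · conv_lhs => rw [pvALoop]
    conv_rhs => rw [pvALoop]
    simp only [if_neg h]
    simp
termination_by n.toNat
decreasing_by
  all_goals rw [PySem.Int.floordiv_eq_ediv_of_pos (by norm_num)]; omega

theorem pvALoop_val (ds : List Int) (h : pvValid ds) :
    pvALoop (pvVal ds) [] = (ds.reverse.map pvLetterAt).flatten := by
  induction ds with
  | nil => rw [pvALoop]; simp [pvVal]
  | cons d ds ih =>
    have hd := h d (by simp)
    have hds : pvValid ds := fun x hx => h x (by simp [hx])
    have hm := pvVal_nonneg ds hds
    have hpos : 0 < pvVal (d :: ds) := by simp only [pvVal]; omega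
    rw [pvALoop, if_pos hpos]
    have hq : PySem.Int.floordiv (pvVal (d :: ds) - 1) 26 = pvVal ds := by
      rw [PySem.Int.floordiv_eq_ediv_of_pos (by norm_num)]
      simp only [pvVal]; omega
    have hr : PySem.Int.mod (pvVal (d :: ds) - 1) 26 = d := by
      rw [PySem.Int.mod_eq_emod_of_pos (by norm_num)]
      simp only [pvVal]; omega
    rw [hq, hr, pvALoop_acc, ih hds]
    simp

theorem pvBLoop_eq (k : Nat) (ds : List Int) (h : pvValid ds) :
    pvBLoop k ds =
      (List.range k).map (fun (j : Nat) => String.ofList (pvALoop (pvVal ds + (j : Int) + 1) [])) := by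
  induction k generalizing ds with
  | zero => simp [pvBLoop]
  | succ k ih =>
    rw [pvBLoop]
    have hvi := pvValid_inc ds h
    have h1 : pvRender (pvInc ds) = String.ofList (pvALoop (pvVal ds + 1) []) := by
      rw [pvRender, ← pvALoop_val _ hvi, pvVal_inc]
    rw [ih _ hvi, List.range_succ_eq_map, List.map_cons, List.map_map, h1]
    refine congrArg₂ _ (by norm_num) (List.map_congr_left (fun j _ => ?_))
    simp only [Function.comp_apply, pvVal_inc]
    congr 2
    push_cast
    ring

theorem pv_foldl_append {α β : Type} (xs : List α) (f : α → β) (acc : List β) :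
    xs.foldl (fun a x => a ++ [f x]) acc = acc ++ xs.map f := by
  induction xs generalizing acc with
  | nil => simp
  | cons x xs ih => simp [List.foldl_cons, ih]

-- ===== VERDICT (by name: the statement is the Claim_ definition above) =====
theorem get_alphabet_sequence_spec : Claim_equal_get_alphabet_sequence := by
  intro count _
  show get_alphabet_sequence count = get_alphabet_sequence_alt count
  rw [get_alphabet_sequence, get_alphabet_sequence_alt,
    PySem.List.pyRange_one, pv_foldl_append, List.nil_append, List.map_map,
    pvBLoop_eq count.toNat [] (by intro d hd; simp at hd)]
  have hcnt : count + 1 - 1 = count := by ring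
  rw [hcnt]
  refine List.map_congr_left (fun j _ => ?_)
  simp only [Function.comp_apply, pvVal]
  congr 2
  omega
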